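-- pv_equiv track=rewrite | github.com/bigalex74/translateVideo | scripts/css_guard.py | check_required_props
-- ===== SOURCE A (Python) =====
-- REQUIRED_PROPS: dict[str, list[str]] = {
--     # Модальные overlays — D-AP-01 (R8-ИЮН-2 bug)
--     '.modal-overlay': ['position', 'background', 'z-index', 'display'],
--     '.modal-box':     ['background', 'border-radius'],
--
--     # Toast/уведомления — должны быть позиционированы
--     '.completion-toast': ['position', 'z-index'],
--
--     # Dashboard overlay — drag-and-drop
--     '.dashboard-dnd-overlay': ['position', 'z-index'],
-- }
--
-- def check_required_props(
--     all_blocks: dict[str, dict[str, str]]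
-- ) -> tuple[list[str], list[str]]:
--     """Проверяет обязательные свойства. Возвращает (errors, warnings)."""
--     errors: list[str] = []
--     warnings: list[str] = []
--
--     for selector, required in REQUIRED_PROPS.items():
--         # Ищем все блоки, содержащие этот selector (точное совпадение или с медиа-суффиксом)
--         matching = {k: v for k, v in all_blocks.items()
--                     if k == selector or k.endswith(' ' + selector)}
--
--         if not matching:
--             # Класс не определён в этих файлах — не ошибка
--             continue
--
--         # Объединяем все свойства из всех блоков с этим селектором
--         merged: dict[str, str] = {}
--         for props in matching.values():
--             merged.update(props)
--
--         missing = [p for p in required if p not in merged]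
--         if missing:
--             errors.append(
--                 f"BLOCKER [{selector}]: отсутствуют обязательные свойства: "
--                 f"{', '.join(missing)}"
--             )
--
--     return errors, warnings
-- ===== SOURCE B (Python) =====
-- REQUIRED_PROPS: dict[str, list[str]] = {
--     '.modal-overlay': ['position', 'background', 'z-index', 'display'],
--     '.modal-box':     ['background', 'border-radius'],
--     '.completion-toast': ['position', 'z-index'],
--     '.dashboard-dnd-overlay': ['position', 'z-index'],
-- }
--
--
-- def check_required_props(
--     all_blocks: dict[str, dict[str, str]]
-- ) -> tuple[list[str], list[str]]:
--     """Single pass over all_blocks building selector -> seen-property index."""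
--     index: dict[str, set[str]] = {}
--     for k, v in all_blocks.items():
--         for sel in REQUIRED_PROPS:
--             if k == sel or k.endswith(' ' + sel):
--                 index.setdefault(sel, set()).update(v)
--
--     errors: list[str] = []
--     for sel, required in REQUIRED_PROPS.items():
--         if sel not in index:
--             continue
--         seen = index[sel]
--         missing = [p for p in required if p not in seen]
--         if missing:
--             errors.append(
--                 f"BLOCKER [{sel}]: отсутствуют обязательные свойства: "
--                 f"{', '.join(missing)}"
--             )
--     return errors, []
-- ===== Notes on version B (the rewrite author's own statement) =====
-- stated objective: alternative
-- what changed: A rescans all_blocks once per REQUIRED_PROPS selector (filter, then merge the matching blocks' dicts); B makes a single pass over all_blocks building a selector -> seen-property-names set index and then reads REQUIRED_PROPS off that index in its fixed order.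
import Mathlib
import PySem

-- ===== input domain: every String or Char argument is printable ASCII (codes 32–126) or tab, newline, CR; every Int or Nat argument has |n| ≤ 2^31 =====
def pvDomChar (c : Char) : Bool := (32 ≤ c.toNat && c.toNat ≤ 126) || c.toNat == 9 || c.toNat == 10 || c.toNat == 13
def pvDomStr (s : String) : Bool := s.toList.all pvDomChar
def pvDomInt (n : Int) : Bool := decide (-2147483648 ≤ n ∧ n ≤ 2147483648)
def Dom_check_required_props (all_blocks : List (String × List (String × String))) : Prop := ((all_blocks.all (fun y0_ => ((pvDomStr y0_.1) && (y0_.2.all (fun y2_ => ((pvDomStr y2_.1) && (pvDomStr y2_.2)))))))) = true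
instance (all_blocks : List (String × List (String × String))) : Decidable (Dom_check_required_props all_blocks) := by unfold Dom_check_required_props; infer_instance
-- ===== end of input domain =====

-- B replaces A's per-selector rescans of all_blocks by one pass building a selector→seen-properties index (objective: alternative traversal).

-- shared constant: REQUIRED_PROPS in its fixed order
def reqProps : List (String × List String) :=
  [(".modal-overlay", ["position", "background", "z-index", "display"]),
   (".modal-box", ["background", "border-radius"]),
   (".completion-toast", ["position", "z-index"]),
   (".dashboard-dnd-overlay", ["position", "z-index"])]

-- shared message formatting (identical f-string in both Pythons)
def blockerMsg (selector : String) (missing : List String) : String :=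
  "BLOCKER [" ++ selector ++ "]: отсутствуют обязательные свойства: " ++ PySem.Str.join ", " missing

-- ===== PORT A =====
def check_required_props (all_blocks : List (String × List (String × String))) : List String × List String :=
  let errors : List String := []
  let warnings : List String := []
  let errors := reqProps.foldl (fun (errors : List String) sp =>
    let selector := sp.1
    let required := sp.2
    let matching : PySem.Dict String (List (String × String)) :=
      PySem.Dict.ofList (all_blocks.filter
        (fun kv => kv.1 == selector || PySem.Str.endswith kv.1 (" " ++ selector)))
    if matching.items.isEmpty then errors
    else
      let merged : PySem.Dict String String :=
        matching.values.foldl (fun m props => m.update props) PySem.Dict.empty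
      let missing := required.filter (fun p => !(merged.contains p))
      if missing.isEmpty then errors
      else errors ++ [blockerMsg selector missing]) errors
  (errors, warnings)

-- ===== PORT B =====
def matchesSelector (k sel : String) : Bool := k == sel || PySem.Str.endswith k (" " ++ sel)

def buildIndex (all_blocks : List (String × List (String × String))) : PySem.Dict String (PySem.Set String) :=
  all_blocks.foldl (fun idx kv =>
    reqProps.foldl (fun idx sp =>
      if matchesSelector kv.1 sp.1 then
        idx.insert sp.1 (PySem.Set.update (idx.getD sp.1 PySem.Set.empty) (kv.2.map Prod.fst))
      else idx) idx) PySem.Dict.empty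

def check_required_props_alt (all_blocks : List (String × List (String × String))) : List String × List String :=
  let index := buildIndex all_blocks
  let errors := reqProps.foldl (fun (errors : List String) sp =>
    match index.get? sp.1 with
    | none => errors
    | some seen =>
      let missing := sp.2.filter (fun p => !(PySem.Set.contains seen p))
      if missing.isEmpty then errors
      else errors ++ [blockerMsg sp.1 missing]) []
  (errors, [])

-- ===== PRECONDITION & SPEC =====
-- Pre_ excludes association lists with duplicate block keys: they never arise from A's dict-typed
-- Python argument, and on them A's dict-comprehension last-key-wins merging is accidental.
def Pre_check_required_props (all_blocks : List (String × List (String × String))) : Prop :=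
  (all_blocks.map Prod.fst).Nodup
instance (all_blocks : List (String × List (String × String))) : Decidable (Pre_check_required_props all_blocks) := by unfold Pre_check_required_props; infer_instance

def pvWitness_check_required_props : (List (String × List (String × String))) :=
  [(".modal-box", [("background", "#fff")])]

def Spec_check_required_props (all_blocks : List (String × List (String × String))) (out : List String × List String) : Prop := out = check_required_props_alt all_blocks
instance (all_blocks : List (String × List (String × String))) (out : List String × List String) : Decidable (Spec_check_required_props all_blocks out) := by unfold Spec_check_required_props; infer_instance

-- ===== CLAIM (what is proved, stated in full; the proofs are below) =====
def Claim_equal_check_required_props : Prop := ∀ (all_blocks : List (String × List (String × String))), Dom_check_required_props all_blocks → Pre_check_required_props all_blocks → Spec_check_required_props all_blocks (check_required_props all_blocks)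

-- ===== LEMMAS AND PROOFS =====

-- proof-only abbreviations for the two sides' per-selector data
def condOf (sel : String) : (String × List (String × String)) → Bool := fun kv => matchesSelector kv.1 sel

def missingA (blocks : List (String × List (String × String))) (sp : String × List String) : List String :=
  sp.2.filter (fun p =>
    !(((PySem.Dict.ofList (blocks.filter (condOf sp.1))).values.foldl
        (fun m props => m.update props) PySem.Dict.empty).contains p))

-- generalized-accumulator form of buildIndex
def bIdx (rp : List (String × List String)) (blocks : List (String × List (String × String)))
    (idx : PySem.Dict String (PySem.Set String)) : PySem.Dict String (PySem.Set String) :=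
  blocks.foldl (fun idx kv =>
    rp.foldl (fun idx sp =>
      if matchesSelector kv.1 sp.1 then
        idx.insert sp.1 (PySem.Set.update (idx.getD sp.1 PySem.Set.empty) (kv.2.map Prod.fst))
      else idx) idx) idx

theorem buildIndex_eq_bIdx (blocks : List (String × List (String × String))) :
    buildIndex blocks = bIdx reqProps blocks PySem.Dict.empty := rfl

theorem inner_contains (kv : String × List (String × String)) (rp : List (String × List String))
    (idx : PySem.Dict String (PySem.Set String)) (sel : String) :
    (rp.foldl (fun idx sp =>
      if matchesSelector kv.1 sp.1 then
        idx.insert sp.1 (PySem.Set.update (idx.getD sp.1 PySem.Set.empty) (kv.2.map Prod.fst))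
      else idx) idx).contains sel = true
    ↔ idx.contains sel = true ∨ ∃ sp ∈ rp, sp.1 = sel ∧ matchesSelector kv.1 sp.1 = true := by
  induction rp generalizing idx with
  | nil =>
    simp only [List.foldl_nil]
    constructor
    · exact Or.inl
    · rintro (h | ⟨q, hq, -⟩)
      · exact h
      · cases hq
  | cons sp rp ih =>
    simp only [List.foldl_cons]
    by_cases h : matchesSelector kv.1 sp.1 = true
    · rw [if_pos h, ih]
      rw [PySem.Dict.contains_insert]
      by_cases hsel : sel = sp.1
      · subst hsel
        exact ⟨fun _ => Or.inr ⟨sp, List.mem_cons_self, rfl, h⟩,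
               fun _ => Or.inl (by simp)⟩
      · simp only [Bool.or_eq_true, beq_iff_eq]
        constructor
        · rintro ((hc | hc) | hsp)
          · exact absurd hc hsel
          · exact Or.inl hc
          · obtain ⟨q, hq, h1, h2⟩ := hsp
            exact Or.inr ⟨q, List.mem_cons_of_mem _ hq, h1, h2⟩
        · rintro (hc | ⟨q, hq, h1, h2⟩)
          · exact Or.inl (Or.inr hc)
          · rcases List.mem_cons.mp hq with rfl | hq
            · exact absurd h1 (fun e => hsel e.symm)
            · exact Or.inr ⟨q, hq, h1, h2⟩
    · rw [if_neg h, ih]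
      constructor
      · rintro (hc | ⟨q, hq, h1, h2⟩)
        · exact Or.inl hc
        · exact Or.inr ⟨q, List.mem_cons_of_mem _ hq, h1, h2⟩
      · rintro (hc | ⟨q, hq, h1, h2⟩)
        · exact Or.inl hc
        · rcases List.mem_cons.mp hq with rfl | hq
          · exact absurd h2 h
          · exact Or.inr ⟨q, hq, h1, h2⟩

theorem inner_mem (kv : String × List (String × String)) (rp : List (String × List String))
    (idx : PySem.Dict String (PySem.Set String)) (sel p : String) :
    p ∈ (rp.foldl (fun idx sp =>
      if matchesSelector kv.1 sp.1 then
        idx.insert sp.1 (PySem.Set.update (idx.getD sp.1 PySem.Set.empty) (kv.2.map Prod.fst))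
      else idx) idx).getD sel PySem.Set.empty
    ↔ p ∈ idx.getD sel PySem.Set.empty ∨
      ((∃ sp ∈ rp, sp.1 = sel ∧ matchesSelector kv.1 sp.1 = true) ∧ p ∈ kv.2.map Prod.fst) := by
  induction rp generalizing idx with
  | nil =>
    simp only [List.foldl_nil]
    constructor
    · exact Or.inl
    · rintro (h | ⟨⟨q, hq, -⟩, -⟩)
      · exact h
      · cases hq
  | cons sp rp ih =>
    simp only [List.foldl_cons]
    by_cases h : matchesSelector kv.1 sp.1 = true
    · rw [if_pos h, ih]
      by_cases hsel : sel = sp.1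
      · subst hsel
        rw [PySem.Dict.getD_insert_self, PySem.Set.mem_update]
        constructor
        · rintro ((hm | hm) | ⟨-, hm⟩)
          · exact Or.inl hm
          · exact Or.inr ⟨⟨sp, List.mem_cons_self, rfl, h⟩, hm⟩
          · exact Or.inr ⟨⟨sp, List.mem_cons_self, rfl, h⟩, hm⟩
        · rintro (hm | ⟨-, hm⟩)
          · exact Or.inl (Or.inl hm)
          · exact Or.inl (Or.inr hm)
      · rw [PySem.Dict.getD_insert_of_ne _ _ _ hsel]
        constructor
        · rintro (hm | ⟨⟨q, hq, h1, h2⟩, hm⟩)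
          · exact Or.inl hm
          · exact Or.inr ⟨⟨q, List.mem_cons_of_mem _ hq, h1, h2⟩, hm⟩
        · rintro (hm | ⟨⟨q, hq, h1, h2⟩, hm⟩)
          · exact Or.inl hm
          · rcases List.mem_cons.mp hq with rfl | hq
            · exact absurd h1 (fun e => hsel e.symm)
            · exact Or.inr ⟨⟨q, hq, h1, h2⟩, hm⟩
    · rw [if_neg h, ih]
      constructor
      · rintro (hm | ⟨⟨q, hq, h1, h2⟩, hm⟩)
        · exact Or.inl hm
        · exact Or.inr ⟨⟨q, List.mem_cons_of_mem _ hq, h1, h2⟩, hm⟩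
      · rintro (hm | ⟨⟨q, hq, h1, h2⟩, hm⟩)
        · exact Or.inl hm
        · rcases List.mem_cons.mp hq with rfl | hq
          · exact absurd h2 h
          · exact Or.inr ⟨⟨q, hq, h1, h2⟩, hm⟩

theorem bIdx_contains (rp : List (String × List String)) (blocks : List (String × List (String × String)))
    (idx : PySem.Dict String (PySem.Set String)) (sel : String) :
    (bIdx rp blocks idx).contains sel = true
    ↔ idx.contains sel = true ∨ ∃ kv ∈ blocks, ∃ sp ∈ rp, sp.1 = sel ∧ matchesSelector kv.1 sp.1 = true := by
  induction blocks generalizing idx with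
  | nil =>
    constructor
    · exact Or.inl
    · rintro (h | ⟨b, hb, -⟩)
      · exact h
      · cases hb
  | cons kv blocks ih =>
    show (bIdx rp blocks _).contains sel = true ↔ _
    rw [ih, inner_contains]
    constructor
    · rintro ((hc | hsp) | ⟨b, hb, hs⟩)
      · exact Or.inl hc
      · exact Or.inr ⟨kv, List.mem_cons_self, hsp⟩
      · exact Or.inr ⟨b, List.mem_cons_of_mem _ hb, hs⟩
    · rintro (hc | ⟨b, hb, hs⟩)
      · exact Or.inl (Or.inl hc)
      · rcases List.mem_cons.mp hb with rfl | hb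
        · exact Or.inl (Or.inr hs)
        · exact Or.inr ⟨b, hb, hs⟩

theorem bIdx_mem (rp : List (String × List String)) (blocks : List (String × List (String × String)))
    (idx : PySem.Dict String (PySem.Set String)) (sel p : String) :
    p ∈ (bIdx rp blocks idx).getD sel PySem.Set.empty
    ↔ p ∈ idx.getD sel PySem.Set.empty ∨
      ∃ kv ∈ blocks, (∃ sp ∈ rp, sp.1 = sel ∧ matchesSelector kv.1 sp.1 = true) ∧ p ∈ kv.2.map Prod.fst := by
  induction blocks generalizing idx with
  | nil =>
    constructor
    · exact Or.inl
    · rintro (h | ⟨b, hb, -⟩)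
      · exact h
      · cases hb
  | cons kv blocks ih =>
    show p ∈ (bIdx rp blocks _).getD sel PySem.Set.empty ↔ _
    rw [ih, inner_mem]
    constructor
    · rintro ((hm | hm) | ⟨b, hb, hs⟩)
      · exact Or.inl hm
      · exact Or.inr ⟨kv, List.mem_cons_self, hm⟩
      · exact Or.inr ⟨b, List.mem_cons_of_mem _ hb, hs⟩
    · rintro (hm | ⟨b, hb, hs⟩)
      · exact Or.inl (Or.inl hm)
      · rcases List.mem_cons.mp hb with rfl | hb
        · exact Or.inl (Or.inr hs)
        · exact Or.inr ⟨b, hb, hs⟩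

-- A's merged dict: membership across one update
theorem contains_update (d : PySem.Dict String String) (props : List (String × String)) (p : String) :
    (d.update props).contains p = (d.contains p || props.any (fun q => q.1 == p)) := by
  show (props.foldl (fun m q => m.insert q.1 q.2) d).contains p = _
  rw [Bool.eq_iff_iff]
  rw [PySem.Dict.contains_eq_decide_mem_keys,
      PySem.Dict.keys_foldl_insert_key props Prod.fst (fun _ q => q.2)]
  simp only [decide_eq_true_eq, PySem.Set.mem_update, Bool.or_eq_true, List.any_eq_true,
    beq_iff_eq, List.mem_map, PySem.Dict.contains_eq_decide_mem_keys]

theorem contains_fold_update (ls : List (List (String × String))) (d : PySem.Dict String String) (p : String) :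
    (ls.foldl (fun m props => m.update props) d).contains p
    = (d.contains p || ls.any (fun props => props.any (fun q => q.1 == p))) := by
  induction ls generalizing d with
  | nil => simp
  | cons props ls ih =>
    simp only [List.foldl_cons, List.any_cons, ih, contains_update, Bool.or_assoc]

theorem items_ofList_nodup (pairs : List (String × List (String × String)))
    (h : (pairs.map Prod.fst).Nodup) : (PySem.Dict.ofList pairs).items = pairs := by
  show (pairs.foldl (fun m q => m.insert q.1 q.2) PySem.Dict.empty).items = pairs
  rw [PySem.Dict.items_foldl_insert_fresh pairs Prod.fst Prod.snd PySem.Dict.empty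
    (fun a _ => by simp) h]
  simp [PySem.Dict.empty]

-- per-selector step equality
theorem step_eq (blocks : List (String × List (String × String)))
    (hpre : (blocks.map Prod.fst).Nodup) (errors : List String)
    (sp : String × List String) (hsp : sp ∈ reqProps) :
    (if (PySem.Dict.ofList (blocks.filter (condOf sp.1))).items.isEmpty then errors
     else if (missingA blocks sp).isEmpty then errors
     else errors ++ [blockerMsg sp.1 (missingA blocks sp)])
    = (match (buildIndex blocks).get? sp.1 with
       | none => errors
       | some seen =>
         if (sp.2.filter (fun p => !(PySem.Set.contains seen p))).isEmpty then errors
         else errors ++ [blockerMsg sp.1 (sp.2.filter (fun p => !(PySem.Set.contains seen p)))]) := by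
  have hnd2 : ((blocks.filter (condOf sp.1)).map Prod.fst).Nodup :=
    hpre.sublist (List.Sublist.map Prod.fst List.filter_sublist)
  rw [items_ofList_nodup _ hnd2]
  by_cases hm : ∃ kv ∈ blocks, matchesSelector kv.1 sp.1 = true
  · -- some block matches: both sides take the nonempty branch
    have hfil : blocks.filter (condOf sp.1) ≠ [] := by
      obtain ⟨kv, hkv, hmk⟩ := hm
      intro hnil
      have hmem : kv ∈ blocks.filter (condOf sp.1) := List.mem_filter.mpr ⟨hkv, hmk⟩
      rw [hnil] at hmem; cases hmem
    have hne : (blocks.filter (condOf sp.1)).isEmpty = false :=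
      Bool.eq_false_iff.mpr (fun ht => hfil (List.isEmpty_iff.mp ht))
    have hcont : (buildIndex blocks).contains sp.1 = true := by
      rw [buildIndex_eq_bIdx, bIdx_contains]
      obtain ⟨kv, hkv, hmk⟩ := hm
      exact Or.inr ⟨kv, hkv, sp, hsp, rfl, hmk⟩
    obtain ⟨seen, hg⟩ : ∃ seen, (buildIndex blocks).get? sp.1 = some seen := by
      cases hg : (buildIndex blocks).get? sp.1 with
      | none =>
        rw [PySem.Dict.get?_eq_none_iff_contains, hcont] at hg
        cases hg
      | some s => exact ⟨s, rfl⟩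
    have hvals : (PySem.Dict.ofList (blocks.filter (condOf sp.1))).values
        = (blocks.filter (condOf sp.1)).map Prod.snd := by
      show ((PySem.Dict.ofList (blocks.filter (condOf sp.1))).items).map Prod.snd = _
      rw [items_ofList_nodup _ hnd2]
    have hseen : ∀ p : String,
        (((PySem.Dict.ofList (blocks.filter (condOf sp.1))).values.foldl
          (fun m props => m.update props) PySem.Dict.empty).contains p)
        = PySem.Set.contains seen p := by
      intro p
      have hmemseen : p ∈ seen ↔
          ∃ kv ∈ blocks, matchesSelector kv.1 sp.1 = true ∧ p ∈ kv.2.map Prod.fst := by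
        have hgd : p ∈ (buildIndex blocks).getD sp.1 PySem.Set.empty ↔ p ∈ seen := by
          rw [PySem.Dict.getD_eq_get?_getD, hg]
          rfl
        rw [← hgd, buildIndex_eq_bIdx, bIdx_mem]
        constructor
        · rintro (hemp | ⟨kv, hkv, ⟨q, hqrp, hq1, hqm⟩, hp⟩)
          · rw [PySem.Dict.getD_empty] at hemp; cases hemp
          · exact ⟨kv, hkv, by rw [← hq1]; exact hqm, hp⟩
        · rintro ⟨kv, hkv, hmk, hp⟩
          exact Or.inr ⟨kv, hkv, ⟨sp, hsp, rfl, hmk⟩, hp⟩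
      rw [Bool.eq_iff_iff, hvals, contains_fold_update, PySem.Set.contains_iff, hmemseen]
      simp only [PySem.Dict.contains_empty, Bool.false_or, List.any_eq_true, List.mem_map,
        beq_iff_eq]
      constructor
      · rintro ⟨props, ⟨kv, hkvf, rfl⟩, q, hq, rfl⟩
        obtain ⟨hkv, hmk⟩ := List.mem_filter.mp hkvf
        exact ⟨kv, hkv, hmk, ⟨q, hq, rfl⟩⟩
      · rintro ⟨kv, hkv, hmk, r, hr, rfl⟩
        exact ⟨kv.2, ⟨kv, List.mem_filter.mpr ⟨hkv, hmk⟩, rfl⟩, r, hr, rfl⟩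
    have hmiss : missingA blocks sp = sp.2.filter (fun p => !(PySem.Set.contains seen p)) := by
      unfold missingA
      exact List.filter_congr (fun p _ => by rw [hseen p])
    rw [hne, hg, hmiss]
    simp
  · -- no block matches: filter empty, index has no entry
    have hfil : blocks.filter (condOf sp.1) = [] :=
      List.filter_eq_nil_iff.mpr (fun kv hkv hc => hm ⟨kv, hkv, hc⟩)
    have hnone : (buildIndex blocks).get? sp.1 = none := by
      rw [PySem.Dict.get?_eq_none_iff_contains, buildIndex_eq_bIdx]
      apply Bool.eq_false_iff.mpr
      intro hc
      rcases (bIdx_contains _ _ _ _).mp hc with hce | ⟨kv, hkv, q, hqrp, hq1, hmk⟩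
      · rw [PySem.Dict.contains_empty] at hce; cases hce
      · exact hm ⟨kv, hkv, by rw [← hq1]; exact hmk⟩
    rw [hfil, hnone]
    simp

-- ===== VERDICT (by name: the statement is the Claim_ definition above) =====
theorem check_required_props_spec : Claim_equal_check_required_props := by
  intro blocks _ hpre
  unfold Spec_check_required_props
  show check_required_props blocks = check_required_props_alt blocks
  refine Prod.ext ?_ rfl
  exact PySem.List.foldl_congr_mem reqProps _ _ []
    (fun acc sp hsp => step_eq blocks hpre acc sp hsp)
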